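-- pv_equiv track=rewrite | github.com/pattamatha/204111 | 64_01_Programming(204111)/Exam_Final/Final_1_640510668.py | count_segment
-- ===== SOURCE A (Python) =====
-- def is_in_q1(circle):
-- 	if circle[0] > 0 and circle[1] > 0:
-- 		return True
-- 	else:
-- 		return False
--
-- def is_in_q2(circle):
-- 	left = circle[0] - circle[2]	# ตรวจสอบจุดด้านซ้ายของทุกวงกลม
-- 	if left < 0 and circle[1] > 0:	# ถ้าจุดด้านซ้ายมีค่าน้อยกว่า0 และแกนYมากกว่า0 แสดงว่า มีจุดที่อยู่ใน q2
-- 		return True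
-- 	else:
-- 		return False
--
-- def is_in_q3(circle):
-- 	left = circle[0] - circle[2]	# ตรวจสอบจุดด้านซ้ายของทุกวงกลม
-- 	if left < 0 and circle[1] < 0:	# ถ้าจุดด้านซ้ายมีค่าน้อยกว่า0 และแกนYน้อยกว่า0 แสดงว่า มีจุดที่อยู่ใน q3
-- 		return True
-- 	else:
-- 		return False
--
-- def is_in_q4(circle):
-- 	bot = circle[1] - circle[2]		# ตรวจสอบจุดด้านล่างของทุกวงกลม
-- 	left = circle[0] - circle[2]	# ตรวจสอบจุดด้านซ้ายของทุกวงกลม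
-- 	right = circle[0] + circle[2]	# ตรวจสอบจุดด้านขวาของทุกวงกลม
-- 	if right > 0 and circle[1] < 0:	# ถ้าจุดด้านขวามีค่ามากกว่า0 และแกนYน้อยกว่า0 แสดงว่า มีจุดที่อยู่ใน q4
-- 		return True
-- 	elif bot < 0 and circle[0] > 0:	# ถ้าจุดด้านล่างมีค่าน้อยกว่า0 และแกนXมากกว่า0 แสดงว่า มีจุดที่อยู่ใน q4
-- 		return True
-- 	else:
-- 		return False
--
-- def count_segment(list_a):
-- 	q1 = 0
-- 	q2 = 0
-- 	q3 = 0
-- 	q4 = 0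
-- 	res = []
-- 	for cir in list_a:
-- 		if is_in_q1(cir) == True:
-- 			q1 += 1
-- 	res.append(q1)
-- 	for cir in list_a:
-- 		if is_in_q2(cir) == True:
-- 			q2 += 1
-- 	res.append(q2)
-- 	for cir in list_a:
-- 		if is_in_q3(cir) == True:
-- 			q3 += 1
-- 	res.append(q3)
-- 	for cir in list_a:
-- 		if is_in_q4(cir) == True:
-- 			q4 += 1
-- 	res.append(q4)
-- 	return tuple(res)
-- ===== SOURCE B (Python) =====
-- def count_segment(list_a):
--     q1 = q2 = q3 = q4 = 0
--     for x, y, r in list_a: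
--         if x > 0 and y > 0:
--             q1 += 1
--         if x - r < 0 and y > 0:
--             q2 += 1
--         if x - r < 0 and y < 0:
--             q3 += 1
--         if (x + r > 0 and y < 0) or (y - r < 0 and x > 0):
--             q4 += 1
--     return (q1, q2, q3, q4)
-- ===== Notes on version B (the rewrite author's own statement) =====
-- stated objective: simpler
-- what changed: Replaces A's four helper predicates and four separate traversals of list_a (collected via an intermediate res list and tuple()) with one single pass that tests the inlined quadrant conditions and maintains four counters.
import Mathlib
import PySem

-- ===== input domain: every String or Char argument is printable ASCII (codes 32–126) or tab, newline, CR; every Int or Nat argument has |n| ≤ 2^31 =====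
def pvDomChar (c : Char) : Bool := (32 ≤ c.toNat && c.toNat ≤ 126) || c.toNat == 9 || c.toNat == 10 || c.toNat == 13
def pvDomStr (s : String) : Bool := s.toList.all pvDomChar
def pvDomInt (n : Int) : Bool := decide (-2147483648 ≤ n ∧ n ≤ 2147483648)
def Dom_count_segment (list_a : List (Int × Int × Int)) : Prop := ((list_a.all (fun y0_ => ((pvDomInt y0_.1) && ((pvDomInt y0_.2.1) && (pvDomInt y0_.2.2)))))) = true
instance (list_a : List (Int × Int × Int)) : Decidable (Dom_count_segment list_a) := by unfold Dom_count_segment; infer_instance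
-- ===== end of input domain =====

-- B fuses A's four separate traversals (with helper predicates and an intermediate res list) into one single pass with four counters; objective: simpler.

-- ===== PORT A =====
def is_in_q1 (circle : Int × Int × Int) : Bool :=
  if circle.1 > 0 && circle.2.1 > 0 then true else false

def is_in_q2 (circle : Int × Int × Int) : Bool :=
  let left := circle.1 - circle.2.2
  if left < 0 && circle.2.1 > 0 then true else false

def is_in_q3 (circle : Int × Int × Int) : Bool :=
  let left := circle.1 - circle.2.2
  if left < 0 && circle.2.1 < 0 then true else false

def is_in_q4 (circle : Int × Int × Int) : Bool :=
  let bot := circle.2.1 - circle.2.2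
  let _left := circle.1 - circle.2.2
  let right := circle.1 + circle.2.2
  if right > 0 && circle.2.1 < 0 then true
  else if bot < 0 && circle.1 > 0 then true
  else false

def count_segment (list_a : List (Int × Int × Int)) : Int × Int × Int × Int :=
  let q1 : Int := list_a.foldl (fun q cir => if is_in_q1 cir == true then q + 1 else q) 0
  let q2 : Int := list_a.foldl (fun q cir => if is_in_q2 cir == true then q + 1 else q) 0
  let q3 : Int := list_a.foldl (fun q cir => if is_in_q3 cir == true then q + 1 else q) 0
  let q4 : Int := list_a.foldl (fun q cir => if is_in_q4 cir == true then q + 1 else q) 0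
  (q1, q2, q3, q4)

-- ===== PORT B =====
def count_segment_alt (list_a : List (Int × Int × Int)) : Int × Int × Int × Int :=
  list_a.foldl
    (fun (acc : Int × Int × Int × Int) xyr =>
      let x := xyr.1; let y := xyr.2.1; let r := xyr.2.2
      let q1 := if x > 0 && y > 0 then acc.1 + 1 else acc.1
      let q2 := if x - r < 0 && y > 0 then acc.2.1 + 1 else acc.2.1
      let q3 := if x - r < 0 && y < 0 then acc.2.2.1 + 1 else acc.2.2.1
      let q4 := if (x + r > 0 && y < 0) || (y - r < 0 && x > 0) then acc.2.2.2 + 1 else acc.2.2.2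
      (q1, q2, q3, q4))
    (0, 0, 0, 0)

-- ===== PRECONDITION & SPEC =====
def Spec_count_segment (list_a : List (Int × Int × Int)) (out : Int × Int × Int × Int) : Prop := out = count_segment_alt list_a
instance (list_a : List (Int × Int × Int)) (out : Int × Int × Int × Int) : Decidable (Spec_count_segment list_a out) := by unfold Spec_count_segment; infer_instance

-- ===== CLAIM (what is proved, stated in full; the proofs are below) =====
def Claim_equal_count_segment : Prop := ∀ (list_a : List (Int × Int × Int)), Dom_count_segment list_a → Spec_count_segment list_a (count_segment list_a)

-- ===== LEMMAS AND PROOFS =====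

-- the single fused pass, started from any accumulator, adds the four independent fold counts
theorem alt_fold_eq (l : List (Int × Int × Int)) (a b c d : Int) :
    l.foldl
      (fun (acc : Int × Int × Int × Int) xyr =>
        let x := xyr.1; let y := xyr.2.1; let r := xyr.2.2
        let q1 := if x > 0 && y > 0 then acc.1 + 1 else acc.1
        let q2 := if x - r < 0 && y > 0 then acc.2.1 + 1 else acc.2.1
        let q3 := if x - r < 0 && y < 0 then acc.2.2.1 + 1 else acc.2.2.1
        let q4 := if (x + r > 0 && y < 0) || (y - r < 0 && x > 0) then acc.2.2.2 + 1 else acc.2.2.2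
        (q1, q2, q3, q4))
      (a, b, c, d)
    = (l.foldl (fun q cir => if is_in_q1 cir == true then q + 1 else q) a,
       l.foldl (fun q cir => if is_in_q2 cir == true then q + 1 else q) b,
       l.foldl (fun q cir => if is_in_q3 cir == true then q + 1 else q) c,
       l.foldl (fun q cir => if is_in_q4 cir == true then q + 1 else q) d) := by
  induction l generalizing a b c d with
  | nil => rfl
  | cons hd tl ih =>
    obtain ⟨x, y, r⟩ := hd
    have h1 : (is_in_q1 (x, y, r) == true) = (x > 0 && y > 0) := by
      simp [is_in_q1]
    have h2 : (is_in_q2 (x, y, r) == true) = (x - r < 0 && y > 0) := by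
      simp [is_in_q2]
    have h3 : (is_in_q3 (x, y, r) == true) = (x - r < 0 && y < 0) := by
      simp [is_in_q3]
    have h4 : (is_in_q4 (x, y, r) == true) = ((x + r > 0 && y < 0) || (y - r < 0 && x > 0)) := by
      simp only [is_in_q4]
      split_ifs <;> simp_all
    simp only [List.foldl]
    rw [ih, h1, h2, h3, h4]

-- ===== VERDICT (by name: the statement is the Claim_ definition above) =====
theorem count_segment_spec : Claim_equal_count_segment := by
  intro l _
  unfold Spec_count_segment count_segment count_segment_alt
  rw [alt_fold_eq]
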